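-- pv_equiv track=rewrite | github.com/gopichandblr02/python_qns | Qns_GeeksForGeeks/gfg_two_pointers.py | reverse_preserve_spaces
-- ===== SOURCE A (Python) =====
-- def reverse_preserve_spaces(s: str) -> str:
--     arr = list(s)
--     left, right = 0, len(arr) - 1
--     while left < right:
--         if arr[left] == " ":
--             left += 1
--         elif arr[right] == " ":
--             right -= 1
--         else:
--             arr[left], arr[right] = arr[right], arr[left]
--             left += 1
--             right -= 1
--     return "".join(arr)
-- ===== SOURCE B (Python) =====
-- def reverse_preserve_spaces(s: str) -> str:
--     rev = [c for c in s if c != ' ']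
--     rev.reverse()
--     it = iter(rev)
--     return ''.join(c if c == ' ' else next(it) for c in s)
-- ===== Notes on version B (the rewrite author's own statement) =====
-- stated objective: simpler
-- what changed: Replaces the symmetric two-pointer in-place swapping loop with a filter-reverse-then-refill two-pass: collect non-space chars, reverse them, and re-emit them in order at the non-space positions.
import Mathlib
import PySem

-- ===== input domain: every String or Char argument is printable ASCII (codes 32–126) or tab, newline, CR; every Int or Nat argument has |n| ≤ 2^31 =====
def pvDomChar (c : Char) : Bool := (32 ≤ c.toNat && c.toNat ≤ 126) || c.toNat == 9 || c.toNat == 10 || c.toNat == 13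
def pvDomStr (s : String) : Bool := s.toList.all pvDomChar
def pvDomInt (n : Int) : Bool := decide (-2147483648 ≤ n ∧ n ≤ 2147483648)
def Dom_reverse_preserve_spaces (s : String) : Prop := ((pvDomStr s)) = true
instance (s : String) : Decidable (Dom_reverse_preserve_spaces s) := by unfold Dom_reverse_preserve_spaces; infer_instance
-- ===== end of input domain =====

-- B replaces A's two-pointer in-place swap with a filter-reverse-then-refill two-pass (simpler); same cost.

-- ===== PORT A =====
-- the while loop of A: left/right pointers over arr, swapping non-space ends
def pvLoopA (arr : List Char) (l r : Int) : List Char :=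
  if _h : l < r then
    match PySem.List.pyGet? arr l, PySem.List.pyGet? arr r with
    | some a, some b =>
      if a = ' ' then pvLoopA arr (l + 1) r
      else if b = ' ' then pvLoopA arr l (r - 1)
      else
        -- arr[left], arr[right] = arr[right], arr[left]
        pvLoopA (PySem.List.pySetD (PySem.List.pySetD arr l b) r a) (l + 1) (r - 1)
    | _, _ => arr  -- unreachable: 0 ≤ l < r < len on every call from the entry point
  else arr
termination_by (r - l).toNat
decreasing_by all_goals omega

def reverse_preserve_spaces (s : String) : String :=
  String.mk (pvLoopA s.toList 0 ((s.toList.length : Int) - 1))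

-- ===== PORT B =====
-- ''.join(c if c == ' ' else next(it) for c in s), it iterating over the reversed non-space chars
def pvRefill : List Char → List Char → List Char
  | [], _ => []
  | c :: xs, q =>
    if c = ' ' then ' ' :: pvRefill xs q
    else
      match q with
      | h :: q' => h :: pvRefill xs q'
      | [] => c :: pvRefill xs []  -- unreachable: q holds exactly the non-space chars of the rest

def reverse_preserve_spaces_alt (s : String) : String :=
  String.mk (pvRefill s.toList ((s.toList.filter (fun c => c ≠ ' ')).reverse))

-- ===== PRECONDITION & SPEC =====
def Spec_reverse_preserve_spaces (s : String) (out : String) : Prop := out = reverse_preserve_spaces_alt s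
instance (s : String) (out : String) : Decidable (Spec_reverse_preserve_spaces s out) := by unfold Spec_reverse_preserve_spaces; infer_instance

-- ===== CLAIM =====
def Claim_equal_reverse_preserve_spaces : Prop := ∀ (s : String), Dom_reverse_preserve_spaces s → Spec_reverse_preserve_spaces s (reverse_preserve_spaces s)

-- ===== LEMMAS AND PROOFS =====

lemma pvRefill_space (xs q : List Char) : pvRefill (' ' :: xs) q = ' ' :: pvRefill xs q := by
  simp [pvRefill]

lemma pvRefill_append_space (xs q : List Char) :
    pvRefill (xs ++ [' ']) q = pvRefill xs q ++ [' '] := by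
  induction xs generalizing q with
  | nil => simp [pvRefill]
  | cons c xs ih =>
    by_cases hc : c = ' '
    · subst hc; simp [pvRefill, ih]
    · cases q with
      | nil => simp [pvRefill, hc, ih]
      | cons h q' => simp [pvRefill, hc, ih]

lemma pvRefill_append_nonspace (xs q : List Char) (c d : Char) (hc : c ≠ ' ')
    (hlen : (xs.filter (fun x => x ≠ ' ')).length = q.length) :
    pvRefill (xs ++ [c]) (q ++ [d]) = pvRefill xs q ++ [d] := by
  induction xs generalizing q with
  | nil =>
    have : q = [] := by
      cases q with
      | nil => rfl
      | cons h t => simp at hlen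
    subst this; simp [pvRefill, hc]
  | cons x xs ih =>
    by_cases hx : x = ' '
    · subst hx
      rw [List.filter_cons_of_neg (by simp)] at hlen
      simp [pvRefill, ih q hlen]
    · rw [List.filter_cons_of_pos (by simp [hx])] at hlen
      cases q with
      | nil => simp at hlen
      | cons h q' =>
        simp only [List.length_cons] at hlen
        simp [pvRefill, hx, ih q' (by omega)]

lemma pvRefill_single (c : Char) : pvRefill [c] ((List.filter (fun x => x ≠ ' ') [c]).reverse) = [c] := by
  by_cases hc : c = ' ' <;> simp [pvRefill, hc]

-- the loop returns its array unchanged once the pointers have met or crossed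
lemma pvLoopA_exit (arr : List Char) (l r : Nat) (hlr : l ≤ r + 1) (hr : r < arr.length)
    (h : ¬ l < r) :
    pvLoopA arr (l : Int) (r : Int) =
      arr.take l ++
        pvRefill ((arr.drop l).take (r + 1 - l))
          ((((arr.drop l).take (r + 1 - l)).filter (fun c => c ≠ ' ')).reverse) ++
        arr.drop (r + 1) := by
  rw [pvLoopA, dif_neg (by exact_mod_cast h)]
  by_cases he : l = r + 1
  · subst he
    simp [pvRefill]
  · have he2 : l = r := by omega
    subst he2
    have hseg : (arr.drop l).take (l + 1 - l) = [arr[l]'hr] := by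
      have : l + 1 - l = 1 := by omega
      rw [this, List.drop_eq_getElem_cons hr, List.take_succ_cons, List.take_zero]
    rw [hseg, pvRefill_single]
    have htake : arr.take (l + 1) = arr.take l ++ [arr[l]'hr] := by
      rw [List.take_add_one, List.getElem?_eq_getElem hr]; rfl
    conv_lhs => rw [← List.take_append_drop (l + 1) arr]
    rw [htake]

-- main invariant of A's loop: on [l, r] it places the reversed non-space chars back at the
-- non-space positions, i.e. it computes pvRefill of that segment
lemma pvLoopA_eq (n : Nat) : ∀ (arr : List Char) (l r : Nat),
    (r + 1 - l) ≤ n → l ≤ r + 1 → r < arr.length →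
    pvLoopA arr (l : Int) (r : Int) =
      arr.take l ++
        pvRefill ((arr.drop l).take (r + 1 - l))
          ((((arr.drop l).take (r + 1 - l)).filter (fun c => c ≠ ' ')).reverse) ++
        arr.drop (r + 1) := by
  induction n with
  | zero =>
    intro arr l r hn hlr hr
    exact pvLoopA_exit arr l r hlr hr (by omega)
  | succ n ih =>
    intro arr l r hn hlr hr
    by_cases h : l < r
    · -- loop body runs
      have hl' : l < arr.length := lt_trans h hr
      rw [pvLoopA]
      rw [dif_pos (by exact_mod_cast h)]
      rw [PySem.List.pyGet?_natCast, PySem.List.pyGet?_natCast]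
      have hget_l : arr[l]? = some arr[l] := List.getElem?_eq_getElem hl'
      have hget_r : arr[r]? = some arr[r] := List.getElem?_eq_getElem hr
      rw [hget_l, hget_r]
      have hdropl : arr.drop l = arr[l] :: arr.drop (l + 1) := List.drop_eq_getElem_cons hl'
      by_cases ha : arr[l] = ' '
      · -- left pointer moves
        simp only [ha, if_pos]
        have hcast : ((l : Int) + 1) = ((l + 1 : Nat) : Int) := by push_cast; ring
        rw [hcast, ih arr (l + 1) r (by omega) (by omega) hr]
        have hseg : (arr.drop l).take (r + 1 - l) = ' ' :: (arr.drop (l + 1)).take (r + 1 - (l + 1)) := by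
          rw [hdropl, ha]
          have : r + 1 - l = (r + 1 - (l + 1)) + 1 := by omega
          rw [this, List.take_succ_cons]
        have htake : arr.take (l + 1) = arr.take l ++ [' '] := by
          rw [List.take_add_one, hget_l, ha]; rfl
        rw [hseg, htake]
        simp [pvRefill_space]
      · by_cases hb : arr[r] = ' '
        · -- right pointer moves
          simp only [hb, if_neg ha, if_pos]
          have hr1 : 1 ≤ r := by omega
          have hcast : ((r : Int) - 1) = ((r - 1 : Nat) : Int) := by omega
          rw [hcast, ih arr l (r - 1) (by omega) (by omega) (by omega)]
          have hidx : (arr.drop l)[r - l]? = some arr[r] := by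
            rw [List.getElem?_drop]
            have : l + (r - l) = r := by omega
            rw [this, hget_r]
          have hseg : (arr.drop l).take (r + 1 - l)
              = (arr.drop l).take (r - l) ++ [' '] := by
            have : r + 1 - l = (r - l) + 1 := by omega
            rw [this, List.take_add_one, hidx, hb]; rfl
          have hseg2 : (arr.drop l).take (r - 1 + 1 - l) = (arr.drop l).take (r - l) := by
            congr 1; omega
          have hdropr : arr.drop r = ' ' :: arr.drop (r + 1) := by
            rw [List.drop_eq_getElem_cons hr, hb]
          have hdropr2 : arr.drop (r - 1 + 1) = arr.drop r := by congr 1; omega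
          rw [hseg, hseg2, hdropr2, hdropr, pvRefill_append_space]
          simp
        · -- swap case
          simp only [if_neg ha, if_neg hb]
          set a := arr[l] with ha_def
          set b := arr[r] with hb_def
          set arr' := (arr.set l b).set r a with harr'
          have hset : PySem.List.pySetD (PySem.List.pySetD arr (l : Int) b) (r : Int) a = arr' := by
            simp [PySem.List.pySetD_natCast, harr']
          have hlen' : arr'.length = arr.length := by simp [harr']
          have hcast1 : ((l : Int) + 1) = ((l + 1 : Nat) : Int) := by push_cast; ring
          have hcast2 : ((r : Int) - 1) = ((r - 1 : Nat) : Int) := by omega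
          rw [hset, hcast1, hcast2, ih arr' (l + 1) (r - 1) (by omega) (by omega) (by omega)]
          have hgl : arr'[l]'(by omega) = b := by
            simp only [harr', List.getElem_set]
            rw [if_neg (by omega)]; simp
          have hgr : arr'[r]'(by omega) = a := by
            simp [harr']
          have htake' : arr'.take (l + 1) = arr.take l ++ [b] := by
            have h1 : arr'.take (l + 1) = arr'.take l ++ [arr'[l]'(by omega)] := by
              rw [List.take_add_one, List.getElem?_eq_getElem (show l < arr'.length by omega)]; rfl
            have h3 : arr'.take l = arr.take l := by
              apply List.ext_getElem (by simp [hlen'])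
              intro i h1i h2i
              have hil : i < l := by simp at h1i; omega
              simp only [List.getElem_take, harr', List.getElem_set]
              rw [if_neg (by omega), if_neg (by omega)]
            rw [h1, hgl, h3]
          have hdrop' : arr'.drop (r - 1 + 1) = a :: arr.drop (r + 1) := by
            have he : r - 1 + 1 = r := by omega
            rw [he, List.drop_eq_getElem_cons (show r < arr'.length by omega)]
            have h3 : arr'.drop (r + 1) = arr.drop (r + 1) := by
              apply List.ext_getElem (by simp [hlen'])
              intro i h1i h2i
              simp only [List.getElem_drop, harr', List.getElem_set]
              rw [if_neg (by omega), if_neg (by omega)]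
            rw [hgr, h3]
          have hmid : (arr'.drop (l + 1)).take (r - 1 + 1 - (l + 1))
              = (arr.drop (l + 1)).take (r - 1 - l) := by
            have he : r - 1 + 1 - (l + 1) = r - 1 - l := by omega
            rw [he]
            apply List.ext_getElem (by simp [hlen'])
            intro i h1i h2i
            have hi : i < r - 1 - l := by simp at h1i; omega
            simp only [List.getElem_take, List.getElem_drop, harr', List.getElem_set]
            rw [if_neg (by omega), if_neg (by omega)]
          set mid := (arr.drop (l + 1)).take (r - 1 - l) with hmid_def
          have hseg : (arr.drop l).take (r + 1 - l) = a :: (mid ++ [b]) := by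
            rw [hdropl]
            have he : r + 1 - l = (r - l) + 1 := by omega
            rw [he, List.take_succ_cons]
            congr 1
            have hidx : (arr.drop (l + 1))[r - 1 - l]? = some b := by
              rw [List.getElem?_drop]
              have : l + 1 + (r - 1 - l) = r := by omega
              rw [this, hget_r]
            have he2 : r - l = (r - 1 - l) + 1 := by omega
            rw [he2, List.take_add_one, hidx]; rfl
          rw [hseg, hmid, htake', hdrop']
          have hfil : ((a :: (mid ++ [b])).filter (fun c => c ≠ ' ')).reverse
              = b :: ((mid.filter (fun c => c ≠ ' ')).reverse ++ [a]) := by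
            simp [List.filter_append, ha, hb]
          rw [hfil]
          have hrefill : pvRefill (a :: (mid ++ [b])) (b :: ((mid.filter (fun c => c ≠ ' ')).reverse ++ [a]))
              = b :: (pvRefill mid ((mid.filter (fun c => c ≠ ' ')).reverse) ++ [a]) := by
            rw [pvRefill]
            simp only [if_neg ha]
            congr 1
            exact pvRefill_append_nonspace mid ((mid.filter (fun c => c ≠ ' ')).reverse) b a hb (by simp)
          rw [hrefill]
          simp
    · exact pvLoopA_exit arr l r hlr hr h

-- ===== VERDICT =====
theorem reverse_preserve_spaces_spec : Claim_equal_reverse_preserve_spaces := by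
  intro s _
  unfold Spec_reverse_preserve_spaces reverse_preserve_spaces reverse_preserve_spaces_alt
  cases harr : s.toList with
  | nil => simp [pvLoopA, pvRefill]
  | cons c cs =>
    have hcast : ((((c :: cs).length : Int)) - 1) = (((c :: cs).length - 1 : Nat) : Int) := by
      simp
    have hmain := pvLoopA_eq ((c :: cs).length) (c :: cs) 0 ((c :: cs).length - 1)
      (by omega) (by omega) (by simp)
    rw [Nat.cast_zero] at hmain
    rw [hcast, hmain]
    simp
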